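-- pv_equiv track=rewrite | github.com/GeruniaSun/ITMO-algs-codeforces | ex_3_D.py | delete_common
-- ===== SOURCE A (Python) =====
-- def delete_common(a, b):
--     count_b = {}
--     for x in b: count_b[x] = count_b.get(x, 0) + 1
--
--     new_a = []
--     for x in a:
--         if count_b.get(x, 0) > 0:
--             count_b[x] -= 1
--         else:
--             new_a.append(x)
--
--     new_b = []
--     for x, cnt in count_b.items():
--         new_b.extend([x] * cnt)
--
--     return new_a, new_b
-- ===== SOURCE B (Python) =====
-- def delete_common(a, b):
--     # keep a[i] iff earlier occurrences of a[i] in a already cover all of b's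
--     new_a = [x for i, x in enumerate(a) if a[:i].count(x) >= b.count(x)]
--     new_b = []
--     seen = []
--     for x in b:
--         if x not in seen:
--             seen.append(x)
--             new_b += [x] * max(b.count(x) - a.count(x), 0)
--     return new_a, new_b
-- ===== Notes on version B (the rewrite author's own statement) =====
-- stated objective: alternative
-- what changed: B drops A's mutated count dict entirely: new_a is a comprehension keeping a[i] iff the count of a[i] in a[:i] already covers its count in b, and new_b is built by a single seen-list pass over b appending max(b.count(x)-a.count(x),0) copies per first occurrence.
import Mathlib
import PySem

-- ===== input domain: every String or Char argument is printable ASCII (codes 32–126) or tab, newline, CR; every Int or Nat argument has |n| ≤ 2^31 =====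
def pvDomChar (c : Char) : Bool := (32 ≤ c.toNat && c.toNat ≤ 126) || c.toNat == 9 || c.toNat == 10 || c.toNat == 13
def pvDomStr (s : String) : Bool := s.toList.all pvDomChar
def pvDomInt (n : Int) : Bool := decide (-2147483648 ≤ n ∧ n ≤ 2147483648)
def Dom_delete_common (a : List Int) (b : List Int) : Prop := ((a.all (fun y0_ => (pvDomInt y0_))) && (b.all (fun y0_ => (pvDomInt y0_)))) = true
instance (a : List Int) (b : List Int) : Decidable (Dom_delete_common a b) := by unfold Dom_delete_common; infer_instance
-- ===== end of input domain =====

-- B is an alternative, dict-free formulation: new_a is a comprehension keeping a[i] iff its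
-- prefix-occurrence count already covers b's count, new_b comes from a seen-list pass over b
-- with per-value count differences (no mutated counter dict).

-- ===== PORT A =====
def delete_common (a : List Int) (b : List Int) : List Int × List Int :=
  -- count_b[x] = count_b.get(x, 0) + 1 over b
  let count_b := b.foldl (fun d x => d.insert x (d.getD x 0 + 1)) (PySem.Dict.empty : PySem.Dict Int Int)
  -- for x in a: if count_b.get(x,0) > 0: count_b[x] -= 1 else: new_a.append(x)
  let st := a.foldl (fun (p : PySem.Dict Int Int × List Int) x =>
      if p.1.getD x 0 > 0 then (p.1.insert x (p.1.getD x 0 - 1), p.2)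
      else (p.1, p.2 ++ [x])) (count_b, [])
  -- for x, cnt in count_b.items(): new_b.extend([x] * cnt)
  let new_b := st.1.items.foldl (fun acc p => acc ++ List.replicate p.2.toNat p.1) []
  (st.2, new_b)

-- ===== PORT B =====
def delete_common_alt (a : List Int) (b : List Int) : List Int × List Int :=
  -- [x for i, x in enumerate(a) if a[:i].count(x) >= b.count(x)]
  let new_a := ((PySem.List.enumerate a 0).filter
      (fun p => decide (b.count p.2 ≤ (PySem.List.slice a none (some p.1)).count p.2))).map (·.2)
  -- for x in b: if x not in seen: seen.append(x); new_b += [x] * max(b.count(x) - a.count(x), 0)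
  let st := b.foldl (fun (p : List Int × List Int) x =>
      if x ∈ p.1 then p
      else (p.1 ++ [x], p.2 ++ List.replicate (max ((b.count x : Int) - (a.count x : Int)) 0).toNat x))
      ([], [])
  (new_a, st.2)

-- ===== PRECONDITION & SPEC =====
def Spec_delete_common (a : List Int) (b : List Int) (out : List Int × List Int) : Prop := out = delete_common_alt a b
instance (a : List Int) (b : List Int) (out : List Int × List Int) : Decidable (Spec_delete_common a b out) := by unfold Spec_delete_common; infer_instance

-- ===== CLAIM (what is proved, stated in full; the proofs are below) =====
def Claim_equal_delete_common : Prop := ∀ (a : List Int) (b : List Int), Dom_delete_common a b → Spec_delete_common a b (delete_common a b)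

-- ===== LEMMAS AND PROOFS =====

-- abstract recursion of A's list loop (state abstracted to a count function)
def pvDropRec (c : Int → Int) : List Int → List Int
  | [] => []
  | x :: xs => if c x > 0 then pvDropRec (fun y => if y = x then c x - 1 else c y) xs
               else x :: pvDropRec c xs

-- always-decrement normal form of the same loop
def pvDropT (c : Int → Int) : List Int → List Int
  | [] => []
  | x :: xs => if c x > 0 then pvDropT (fun y => if y = x then c x - 1 else c y) xs
               else x :: pvDropT (fun y => if y = x then c x - 1 else c y) xs

theorem pvDropRec_eq_T (l : List Int) (c c' : Int → Int)
    (h : ∀ y, c y = c' y ∨ (c y ≤ 0 ∧ c' y ≤ 0)) : pvDropRec c l = pvDropT c' l := by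
  induction l generalizing c c' with
  | nil => rfl
  | cons x xs ih =>
    simp only [pvDropRec, pvDropT]
    rcases h x with hx | hx
    · rw [hx]
      by_cases hp : c' x > 0
      · simp only [if_pos hp]
        exact ih _ _ (fun y => by by_cases hy : y = x <;> simp [hy, hx] <;> rcases h y with h' | h' <;> omega)
      · simp only [if_neg hp]
        refine congrArg (x :: ·) (ih _ _ (fun y => ?_))
        by_cases hy : y = x
        · subst hy; right; omega
        · simp only [if_neg hy]; exact h y
    · rw [if_neg (by omega), if_neg (by omega)]
      refine congrArg (x :: ·) (ih _ _ (fun y => ?_))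
      by_cases hy : y = x
      · subst hy; right; constructor; omega; simp only [if_pos rfl]; omega
      · simp only [if_neg hy]; exact h y

-- A's main loop: list component
theorem pvAloop_snd (l : List Int) (d : PySem.Dict Int Int) (acc : List Int) :
    (l.foldl (fun (p : PySem.Dict Int Int × List Int) x =>
      if p.1.getD x 0 > 0 then (p.1.insert x (p.1.getD x 0 - 1), p.2)
      else (p.1, p.2 ++ [x])) (d, acc)).2 = acc ++ pvDropRec (fun y => d.getD y 0) l := by
  induction l generalizing d acc with
  | nil => simp [pvDropRec]
  | cons x xs ih =>
    simp only [List.foldl_cons, pvDropRec]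
    by_cases hp : d.getD x 0 > 0
    · rw [if_pos hp, if_pos hp, ih]
      congr 1
      refine congrArg (fun f => pvDropRec f xs) (funext (fun y => ?_))
      rw [PySem.Dict.getD_insert]
    · rw [if_neg hp, if_neg hp, ih]
      simp

-- A's main loop: dict component, lookups
theorem pvAloop_fst_getD (l : List Int) (d : PySem.Dict Int Int) (acc : List Int) (y : Int) :
    (l.foldl (fun (p : PySem.Dict Int Int × List Int) x =>
      if p.1.getD x 0 > 0 then (p.1.insert x (p.1.getD x 0 - 1), p.2)
      else (p.1, p.2 ++ [x])) (d, acc)).1.getD y 0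
    = d.getD y 0 - min (l.count y : Int) (max (d.getD y 0) 0) := by
  induction l generalizing d acc with
  | nil => simp
  | cons x xs ih =>
    simp only [List.foldl_cons]
    by_cases hp : d.getD x 0 > 0
    · rw [if_pos hp, ih]
      rw [PySem.Dict.getD_insert]
      by_cases hy : y = x
      · subst hy; simp only [if_pos rfl, List.count_cons_self]; push_cast; omega
      · rw [if_neg hy, List.count_cons_of_ne (show x ≠ y by omega)]
    · rw [if_neg hp, ih]
      by_cases hy : y = x
      · subst hy; simp only [List.count_cons_self]; push_cast; omega
      · rw [List.count_cons_of_ne (show x ≠ y by omega)]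

-- A's main loop: dict component, keys unchanged
theorem pvAloop_fst_keys (l : List Int) (d : PySem.Dict Int Int) (acc : List Int) :
    (l.foldl (fun (p : PySem.Dict Int Int × List Int) x =>
      if p.1.getD x 0 > 0 then (p.1.insert x (p.1.getD x 0 - 1), p.2)
      else (p.1, p.2 ++ [x])) (d, acc)).1.keys = d.keys := by
  induction l generalizing d acc with
  | nil => rfl
  | cons x xs ih =>
    simp only [List.foldl_cons]
    by_cases hp : d.getD x 0 > 0
    · rw [if_pos hp, ih]
      have hc : d.contains x = true := by
        by_contra h
        rw [PySem.Dict.getD_of_not_contains _ _ (by simpa using h)] at hp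
        omega
      exact PySem.Dict.keys_insert_of_contains _ _ hc
    · rw [if_neg hp, ih]

-- counters used by A's port
theorem pvCounter_getD (l : List Int) (y : Int) :
    (l.foldl (fun d x => d.insert x (d.getD x 0 + 1)) (PySem.Dict.empty : PySem.Dict Int Int)).getD y 0 = (l.count y : Int) := by
  rw [PySem.Dict.getD_foldl_insert_add_one]
  simp

theorem pvCounter_keys (l : List Int) :
    (l.foldl (fun d x => d.insert x (d.getD x 0 + 1)) (PySem.Dict.empty : PySem.Dict Int Int)).keys = PySem.Set.ofList l :=
  (congrArg PySem.Dict.keys (PySem.Dict.foldl_insert_getD_add_one_eq_counter l)).trans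
    (PySem.Dict.keys_counter l)

-- A's extend-loop over a counter's items is a flatMap
theorem pvExtendFold (l : List (Int × Int)) (acc : List Int) :
    l.foldl (fun acc p => acc ++ List.replicate p.2.toNat p.1) acc
    = acc ++ l.flatMap (fun p => List.replicate p.2.toNat p.1) := by
  induction l generalizing acc with
  | nil => simp
  | cons p ps ih => simp [ih]

-- ===== B-side characterisations =====

-- filter normal form of pvDropT (the kept elements, read off positionally)
def pvFilt (c : Int → Int) : List Int → List Int
  | [] => []
  | x :: xs => if c x ≤ 0 then x :: pvFilt (fun y => if y = x then c x - 1 else c y) xs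
               else pvFilt (fun y => if y = x then c x - 1 else c y) xs

theorem pvDropT_eq_filt (l : List Int) (c : Int → Int) : pvDropT c l = pvFilt c l := by
  induction l generalizing c with
  | nil => rfl
  | cons x xs ih =>
    simp only [pvDropT, pvFilt]
    by_cases hp : c x > 0
    · rw [if_pos hp, if_neg (by omega), ih]
    · rw [if_neg hp, if_pos (by omega), ih]

-- B's comprehension over enumerate/prefix-slice computes pvFilt
theorem pvEnumFilter (b : List Int) (l pre : List Int) :
    ((PySem.List.enumerate l (pre.length : Int)).filter
      (fun p => decide (b.count p.2 ≤ (PySem.List.slice (pre ++ l) none (some p.1)).count p.2))).map (·.2)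
    = pvFilt (fun y => (b.count y : Int) - (pre.count y : Int)) l := by
  induction l generalizing pre with
  | nil => simp [PySem.List.enumerate_nil, pvFilt]
  | cons x xs ih =>
    have htail := ih (pre ++ [x])
    have hlen : (((pre ++ [x]).length : Nat) : Int) = (pre.length : Int) + 1 := by simp
    have happ : (pre ++ [x]) ++ xs = pre ++ x :: xs := by simp
    rw [hlen, happ] at htail
    have hcfun : (fun y => (b.count y : Int) - ((pre ++ [x]).count y : Int))
        = (fun y => if y = x then ((b.count x : Int) - (pre.count x : Int)) - 1
                    else (b.count y : Int) - (pre.count y : Int)) := by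
      funext y
      by_cases hy : y = x
      · have h1 : List.count x (pre ++ [x]) = List.count x pre + 1 := by
          simp [List.count_append]
        rw [if_pos hy, hy, h1]
        push_cast
        ring
      · have h0 : List.count y [x] = 0 := List.count_eq_zero.mpr (by simp [hy])
        rw [if_neg hy, List.count_append, h0]
        push_cast
        ring
    rw [hcfun] at htail
    have hslice : PySem.List.slice (pre ++ x :: xs) none (some ((pre.length : Nat) : Int)) = pre := by
      rw [PySem.List.slice_to_natCast]
      exact List.take_left
    rw [PySem.List.enumerate_cons, List.filter_cons]
    have hd : (decide (b.count (((pre.length : Int), x).2) ≤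
        (PySem.List.slice (pre ++ x :: xs) none (some (((pre.length : Int), x).1))).count (((pre.length : Int), x).2)))
        = decide (b.count x ≤ pre.count x) := by
      simp only [hslice]
    rw [hd]
    simp only [pvFilt]
    by_cases hk : b.count x ≤ pre.count x
    · have hcpos : (b.count x : Int) - (pre.count x : Int) ≤ 0 := by push_cast; omega
      rw [if_pos (by simpa using hk), if_pos hcpos, List.map_cons, htail]
    · have hcneg : ¬((b.count x : Int) - (pre.count x : Int) ≤ 0) := by push_cast; omega
      rw [if_neg (by simpa using hk), if_neg hcneg, htail]

-- B's seen-list loop: dedup helper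
def pvNews (s : List Int) : List Int → List Int
  | [] => []
  | x :: xs => if x ∈ s then pvNews s xs else x :: pvNews (s ++ [x]) xs

theorem pvSeenFold (g : Int → List Int) (l : List Int) (s acc : List Int) :
    l.foldl (fun (p : List Int × List Int) x =>
      if x ∈ p.1 then p else (p.1 ++ [x], p.2 ++ g x)) (s, acc)
    = (s ++ pvNews s l, acc ++ (pvNews s l).flatMap g) := by
  induction l generalizing s acc with
  | nil => simp [pvNews]
  | cons x xs ih =>
    simp only [List.foldl_cons, pvNews]
    by_cases hx : x ∈ s
    · rw [if_pos hx, if_pos hx, ih]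
    · rw [if_neg hx, if_neg hx, ih]
      simp

-- pvNews [] is exactly PySem.Set.ofList
theorem pvNews_ofList_aux (l : List Int) (s : List Int) :
    l.foldl PySem.Set.add s = s ++ pvNews s l := by
  induction l generalizing s with
  | nil => simp [pvNews]
  | cons x xs ih =>
    simp only [List.foldl_cons, pvNews, PySem.Set.add]
    by_cases hx : x ∈ s
    · rw [if_pos (by simp [PySem.Set.contains, hx]), if_pos hx]
      exact ih s
    · rw [if_neg (by simp [PySem.Set.contains, hx]), if_neg hx, ih (s ++ [x])]
      simp

theorem pvNews_nil_eq (l : List Int) : pvNews [] l = PySem.Set.ofList l := by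
  rw [PySem.Set.ofList_eq_foldl, pvNews_ofList_aux]
  simp

-- ===== the two components agree =====

theorem pv_fst_eq (a b : List Int) :
    (delete_common a b).1 = (delete_common_alt a b).1 := by
  show (a.foldl (fun (p : PySem.Dict Int Int × List Int) x =>
      if p.1.getD x 0 > 0 then (p.1.insert x (p.1.getD x 0 - 1), p.2)
      else (p.1, p.2 ++ [x]))
      (b.foldl (fun d x => d.insert x (d.getD x 0 + 1)) (PySem.Dict.empty : PySem.Dict Int Int), [])).2
    = ((PySem.List.enumerate a 0).filter
        (fun p => decide (b.count p.2 ≤ (PySem.List.slice a none (some p.1)).count p.2))).map (·.2)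
  rw [pvAloop_snd]
  have hcb : (fun y => (b.foldl (fun d x => d.insert x (d.getD x 0 + 1)) (PySem.Dict.empty : PySem.Dict Int Int)).getD y 0)
      = (fun y => ((b.count y : Int))) := funext (fun y => pvCounter_getD b y)
  rw [hcb, pvDropRec_eq_T a _ _ (fun y => Or.inl rfl), pvDropT_eq_filt]
  have h0 := pvEnumFilter b a []
  rw [List.nil_append] at h0
  have hc : (fun y => (b.count y : Int) - ((([] : List Int).count y : Nat) : Int))
      = (fun y => (b.count y : Int)) := by
    funext y; simp
  rw [hc] at h0
  exact h0.symm

theorem pv_snd_eq (a b : List Int) :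
    (delete_common a b).2 = (delete_common_alt a b).2 := by
  show ((a.foldl (fun (p : PySem.Dict Int Int × List Int) x =>
      if p.1.getD x 0 > 0 then (p.1.insert x (p.1.getD x 0 - 1), p.2)
      else (p.1, p.2 ++ [x]))
      (b.foldl (fun d x => d.insert x (d.getD x 0 + 1)) (PySem.Dict.empty : PySem.Dict Int Int), [])).1.items.foldl
      (fun acc p => acc ++ List.replicate p.2.toNat p.1) [])
    = (b.foldl (fun (p : List Int × List Int) x =>
      if x ∈ p.1 then p
      else (p.1 ++ [x], p.2 ++ List.replicate (max ((b.count x : Int) - (a.count x : Int)) 0).toNat x))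
      ([], [])).2
  rw [pvExtendFold, pvSeenFold, pvNews_nil_eq]
  simp only [List.nil_append]
  have hndA : (a.foldl (fun (p : PySem.Dict Int Int × List Int) x =>
      if p.1.getD x 0 > 0 then (p.1.insert x (p.1.getD x 0 - 1), p.2)
      else (p.1, p.2 ++ [x]))
      (b.foldl (fun d x => d.insert x (d.getD x 0 + 1)) (PySem.Dict.empty : PySem.Dict Int Int), [])).1.keys.Nodup := by
    rw [pvAloop_fst_keys, pvCounter_keys b]
    exact PySem.Set.nodup_ofList b
  rw [PySem.Dict.items_eq_map_keys _ hndA (0 : Int), pvAloop_fst_keys, pvCounter_keys b,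
      List.flatMap_map]
  refine congrArg (List.flatMap · (PySem.Set.ofList b)) (funext (fun k => ?_))
  simp only [pvAloop_fst_getD, pvCounter_getD]
  exact congrArg (fun n => List.replicate n k) (by omega)

-- ===== VERDICT (by name: the statement is the Claim_ definition above) =====
theorem delete_common_spec : Claim_equal_delete_common := by
  intro a b _
  unfold Spec_delete_common
  exact Prod.ext (pv_fst_eq a b) (pv_snd_eq a b)
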